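-- pv_equiv track=rewrite | github.com/LARS-research/AutoSF | state.py | state2onehot
-- ===== SOURCE A (Python) =====
-- def state2onehot(state, evaluate=True):
--     length = len(state)
--     assert length%4 == 0
--     vector = [0] * (16*6)
--     for i in range(4):
--         r = i
--         h = i
--         t = state[i]
--         vector[h*24 + t*6 + r] = 1          # a_ij
--         vector[h*24 + t*6 + 4+1] = 1        # sign
--     for i in range(4, length):
--         if i%4 == 0:
--             r = state[i]
--         elif i%4 == 1:
--             h = state[i]
--         elif i%4 == 2:
--             t = state[i]
--         elif i%4 == 3:
--             sign = max(state[i], 0)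
--             vector[h*24 + t*6 + r] = 1
--             vector[h*24 + t*6 + 4+sign] = 1
--     return vector
-- ===== SOURCE B (Python) =====
-- def state2onehot(state, evaluate=True):
--     length = len(state)
--     assert length % 4 == 0
--     vector = [0] * 96
--     for i in range(4):
--         t = state[i]
--         vector[i*24 + t*6 + i] = 1          # a_ij
--         vector[i*24 + t*6 + 5] = 1          # sign
--     for i in range(4, length, 4):
--         r = state[i]
--         h = state[i+1]
--         t = state[i+2]
--         sign = max(state[i+3], 0)
--         vector[h*24 + t*6 + r] = 1
--         vector[h*24 + t*6 + 4 + sign] = 1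
--     return vector
-- ===== Notes on version B (the rewrite author's own statement) =====
-- stated objective: simpler
-- what changed: The flat i%4-dispatch loop that accumulates r/h/t across four iterations is replaced by a stride-4 loop that reads each 4-tuple (r,h,t,sign) directly and writes its two one-hot entries at once; no carried state or modulo branching.
import Mathlib
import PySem

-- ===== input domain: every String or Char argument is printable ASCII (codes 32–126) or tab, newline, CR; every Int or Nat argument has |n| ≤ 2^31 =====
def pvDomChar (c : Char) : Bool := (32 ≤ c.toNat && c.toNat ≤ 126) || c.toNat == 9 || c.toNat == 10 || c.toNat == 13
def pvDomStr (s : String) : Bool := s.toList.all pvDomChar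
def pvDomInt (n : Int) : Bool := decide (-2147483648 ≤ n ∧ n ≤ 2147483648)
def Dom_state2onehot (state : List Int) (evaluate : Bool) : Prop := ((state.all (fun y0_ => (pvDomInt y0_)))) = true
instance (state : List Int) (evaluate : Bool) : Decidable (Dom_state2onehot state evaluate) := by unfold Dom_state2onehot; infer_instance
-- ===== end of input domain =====

-- B replaces A's flat i%4-dispatch loop (carrying r/h/t across iterations) by a stride-4 loop
-- consuming each 4-tuple directly; same return value wherever A returns.

-- ===== PORT A =====
-- body of A's first loop over range(4) (carries (vector, r, h, t) like the Python locals)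
def pvStepA0 (state : List Int) (acc : List Int × Int × Int × Int) (i : Int) :
    List Int × Int × Int × Int :=
  let vector := acc.1
  let r := i
  let h := i
  let t := PySem.List.pyGetD state i 0
  let vector := PySem.List.pySetD vector (h*24 + t*6 + r) 1
  let vector := PySem.List.pySetD vector (h*24 + t*6 + 4+1) 1
  (vector, r, h, t)

-- body of A's second loop over range(4, length): i%4 dispatch over the carried (vector, r, h, t)
def pvStepA (state : List Int) (acc : List Int × Int × Int × Int) (i : Int) :
    List Int × Int × Int × Int :=
  let vector := acc.1
  let r := acc.2.1
  let h := acc.2.2.1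
  let t := acc.2.2.2
  if PySem.Int.mod i 4 = 0 then (vector, PySem.List.pyGetD state i 0, h, t)
  else if PySem.Int.mod i 4 = 1 then (vector, r, PySem.List.pyGetD state i 0, t)
  else if PySem.Int.mod i 4 = 2 then (vector, r, h, PySem.List.pyGetD state i 0)
  else if PySem.Int.mod i 4 = 3 then
    let sign := max (PySem.List.pyGetD state i 0) 0
    let vector := PySem.List.pySetD vector (h*24 + t*6 + r) 1
    let vector := PySem.List.pySetD vector (h*24 + t*6 + 4 + sign) 1
    (vector, r, h, t)
  else (vector, r, h, t)

def state2onehot (state : List Int) (evaluate : Bool) : List Int :=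
  let length : Int := state.length
  -- 'assert length % 4 == 0' raises outside Pre_; excluded there
  let vector : List Int := List.replicate (16*6) 0
  let s1 := (PySem.List.pyRange 0 4 1).foldl (pvStepA0 state) (vector, 0, 0, 0)
  let s2 := (PySem.List.pyRange 4 length 1).foldl (pvStepA state) s1
  s2.1

-- ===== PORT B =====
def pvStepB0 (state : List Int) (vector : List Int) (i : Int) : List Int :=
  let t := PySem.List.pyGetD state i 0
  let vector := PySem.List.pySetD vector (i*24 + t*6 + i) 1
  PySem.List.pySetD vector (i*24 + t*6 + 5) 1

def pvStepB (state : List Int) (vector : List Int) (i : Int) : List Int :=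
  let r := PySem.List.pyGetD state i 0
  let h := PySem.List.pyGetD state (i+1) 0
  let t := PySem.List.pyGetD state (i+2) 0
  let sign := max (PySem.List.pyGetD state (i+3) 0) 0
  let vector := PySem.List.pySetD vector (h*24 + t*6 + r) 1
  PySem.List.pySetD vector (h*24 + t*6 + 4 + sign) 1

def state2onehot_alt (state : List Int) (evaluate : Bool) : List Int :=
  let length : Int := state.length
  let vector : List Int := List.replicate 96 0
  let vector := (PySem.List.pyRange 0 4 1).foldl (pvStepB0 state) vector
  (PySem.List.pyRange 4 length 4).foldl (pvStepB state) vector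

-- ===== PRECONDITION & SPEC =====
-- a list index i into the length-96 vector that Python accepts (negative = from the end)
def pvOkIdx (v : Int) : Prop := -96 ≤ v ∧ v < 96

-- Pre_ = exactly the inputs on which the Python A returns: length a positive multiple of 4
-- (the assert and the reads state[0..3]) and every write index within Python's range for a
-- 96-element list (otherwise IndexError).
def Pre_state2onehot (state : List Int) (evaluate : Bool) : Prop :=
  state.length % 4 = 0 ∧ 4 ≤ state.length ∧
  (∀ i ∈ List.range 4,
      pvOkIdx ((i : Int)*24 + (state.getD i 0)*6 + i) ∧
      pvOkIdx ((i : Int)*24 + (state.getD i 0)*6 + 5)) ∧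
  (∀ k ∈ List.range (state.length / 4), 1 ≤ k →
      pvOkIdx ((state.getD (4*k+1) 0)*24 + (state.getD (4*k+2) 0)*6 + state.getD (4*k) 0) ∧
      pvOkIdx ((state.getD (4*k+1) 0)*24 + (state.getD (4*k+2) 0)*6 + 4
                + max (state.getD (4*k+3) 0) 0))

instance (state : List Int) (evaluate : Bool) : Decidable (Pre_state2onehot state evaluate) := by
  unfold Pre_state2onehot pvOkIdx; infer_instance

def pvWitness_state2onehot : List Int × Bool := ([0, 0, 0, 0], true)

def Spec_state2onehot (state : List Int) (evaluate : Bool) (out : List Int) : Prop := out = state2onehot_alt state evaluate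
instance (state : List Int) (evaluate : Bool) (out : List Int) : Decidable (Spec_state2onehot state evaluate out) := by unfold Spec_state2onehot; infer_instance

-- ===== CLAIM (what is proved, stated in full; the proofs are below) =====
def Claim_equal_state2onehot : Prop := ∀ (state : List Int) (evaluate : Bool), Dom_state2onehot state evaluate → Pre_state2onehot state evaluate → Spec_state2onehot state evaluate (state2onehot state evaluate)

-- ===== LEMMAS AND PROOFS =====

-- range(a, a+4(m+1), 4) pulls off its head
lemma pvRange4_succ (a : Int) (m : Nat) :
    PySem.List.pyRange a ((a+4) + 4*(m : Int)) 4
      = a :: PySem.List.pyRange (a+4) ((a+4) + 4*(m : Int)) 4 := by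
  rw [PySem.List.pyRange_of_pos _ _ (by norm_num), PySem.List.pyRange_of_pos _ _ (by norm_num)]
  have h1 : a < (a+4) + 4*(m : Int) := by omega
  have h2 : (((a+4) + 4*(m : Int) - a + 4 - 1)/4).toNat = m + 1 := by omega
  have h3 : (if a + 4 < (a+4) + 4*(m : Int) then (((a+4) + 4*(m : Int) - (a+4) + 4 - 1)/4).toNat else 0) = m := by
    split <;> omega
  rw [if_pos h1, h2, h3, List.range_succ_eq_map]
  simp only [List.map_cons, List.map_map]
  congr 1
  · norm_num
  · apply List.map_congr_left
    intro k _
    simp only [Function.comp, Nat.succ_eq_add_one]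
    push_cast
    ring

-- the heart: A's flat dispatch loop equals B's chunked loop, from any 4-aligned start
lemma pvLoop_eq (state : List Int) (m : Nat) : ∀ (a : Int), a % 4 = 0 →
    ∀ (vec : List Int) (r h t : Int),
    ((PySem.List.pyRange a (a + 4*(m : Int)) 1).foldl (pvStepA state) (vec, r, h, t)).1
      = (PySem.List.pyRange a (a + 4*(m : Int)) 4).foldl (pvStepB state) vec := by
  induction m with
  | zero =>
      intro a _ vec r h t
      rw [PySem.List.pyRange_one_eq_nil (by omega)]
      rw [PySem.List.pyRange_of_pos _ _ (by norm_num : (0:Int) < 4)]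
      simp
  | succ m ih =>
      intro a ha vec r h t
      have hm : (0:Int) ≤ (m : Int) := Int.natCast_nonneg m
      have hub : a + 4*((m+1 : Nat) : Int) = (a+4) + 4*(m : Int) := by push_cast; ring
      rw [hub]
      rw [PySem.List.pyRange_one_cons (by omega)]
      rw [PySem.List.pyRange_one_cons (by omega)]
      rw [PySem.List.pyRange_one_cons (by omega)]
      rw [PySem.List.pyRange_one_cons (by omega)]
      rw [show a+1+1+1+1 = a+4 from by ring]
      rw [pvRange4_succ a m]
      simp only [List.foldl_cons]
      have e0 : pvStepA state (vec, r, h, t) a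
          = (vec, PySem.List.pyGetD state a 0, h, t) := by
        unfold pvStepA
        dsimp only
        rw [PySem.Int.mod_eq_emod_of_pos (by norm_num : (0:Int) < 4)]
        rw [if_pos (by omega)]
      have e1 : ∀ v r' t', pvStepA state (v, r', h, t') (a+1)
          = (v, r', PySem.List.pyGetD state (a+1) 0, t') := by
        intro v r' t'
        unfold pvStepA
        dsimp only
        rw [PySem.Int.mod_eq_emod_of_pos (by norm_num : (0:Int) < 4)]
        rw [if_neg (by omega), if_pos (by omega)]
      have e2 : ∀ v r' h', pvStepA state (v, r', h', t) (a+1+1)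
          = (v, r', h', PySem.List.pyGetD state (a+2) 0) := by
        intro v r' h'
        rw [show a+1+1 = a+2 from by ring]
        unfold pvStepA
        dsimp only
        rw [PySem.Int.mod_eq_emod_of_pos (by norm_num : (0:Int) < 4)]
        rw [if_neg (by omega), if_neg (by omega), if_pos (by omega)]
      have e3 : ∀ (v : List Int) r' h' t', pvStepA state (v, r', h', t') (a+1+1+1)
          = (PySem.List.pySetD (PySem.List.pySetD v (h'*24 + t'*6 + r') 1)
              (h'*24 + t'*6 + 4 + max (PySem.List.pyGetD state (a+3) 0) 0) 1, r', h', t') := by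
        intro v r' h' t'
        rw [show a+1+1+1 = a+3 from by ring]
        unfold pvStepA
        dsimp only
        rw [PySem.Int.mod_eq_emod_of_pos (by norm_num : (0:Int) < 4)]
        rw [if_neg (by omega), if_neg (by omega), if_neg (by omega), if_pos (by omega)]
      rw [e0, e1, e2, e3]
      rw [ih (a+4) (by omega)]
      rfl

lemma pvFirst_loop (state : List Int) (vec : List Int) (r h t : Int) :
    (PySem.List.pyRange 0 4 1).foldl (pvStepA0 state) (vec, r, h, t)
      = ((PySem.List.pyRange 0 4 1).foldl (pvStepB0 state) vec, 3, 3,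
          PySem.List.pyGetD state 3 0) := by
  have h4 : PySem.List.pyRange 0 4 1 = [0, 1, 2, 3] := by decide
  rw [h4]
  simp only [List.foldl_cons, List.foldl_nil, pvStepA0, pvStepB0]
  ring_nf

-- ===== VERDICT (by name: the statement is the Claim_ definition above) =====
theorem state2onehot_spec : Claim_equal_state2onehot := by
  intro state evaluate _ hpre
  obtain ⟨h4, hge, -, -⟩ := hpre
  obtain ⟨m, hm⟩ : ∃ m : Nat, state.length = 4 + 4*m := ⟨state.length/4 - 1, by omega⟩
  unfold Spec_state2onehot state2onehot state2onehot_alt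
  simp only []
  rw [pvFirst_loop state _ 0 0 0]
  have hlen : (state.length : Int) = 4 + 4*(m : Int) := by rw [hm]; push_cast; ring
  rw [hlen]
  exact pvLoop_eq state m 4 (by norm_num) _ 3 3 (PySem.List.pyGetD state 3 0)
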